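-- pv_equiv track=rewrite | github.com/BenGOsborn/problems | SmartSale.py | delete_products
-- ===== SOURCE A (Python) =====
-- def get_occurances(ids):
--     occurances = {}
--     occurances_arr = []
--
--     for elem in ids:
--         if elem in occurances:
--             occurances[elem] += 1
--         else:
--             occurances[elem] = 1
--
--     for key in occurances:
--         occurances_arr.append([occurances[key], key])
--
--     return sorted(occurances_arr)
--
-- def delete_products(ids, m):
--     count = 0
--
--     occurances = get_occurances(ids)
--
--     size = len(occurances)
--
--     for i in range(size):
--         if (occurances[i][0] <= m):
--             m -= occurances[i][0]
--             count += 1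
--
--         else:
--             return size - count
--
--     return size - count
-- ===== SOURCE B (Python) =====
-- def delete_products(ids, m):
--     freq = {}
--     for x in ids:
--         freq[x] = freq.get(x, 0) + 1
--     if len(freq) == 0:
--         return 0
--     max_c = max(freq.values())
--     buckets = {}
--     for c in freq.values():
--         buckets[c] = buckets.get(c, 0) + 1
--     removed = 0
--     for c in range(1, max_c + 1):
--         b = buckets.get(c, 0)
--         while b > 0 and m >= c:
--             m -= c
--             removed += 1
--             b -= 1
--     return len(freq) - removed
-- ===== Notes on version B (the rewrite author's own statement) =====
-- stated objective: faster
-- what changed: replaces the dict-to-pair-list + comparison sort + greedy scan over sorted (count,id) pairs by a frequency-of-frequencies bucket table scanned in increasing count order (counting sort over frequency values)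
import Mathlib
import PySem

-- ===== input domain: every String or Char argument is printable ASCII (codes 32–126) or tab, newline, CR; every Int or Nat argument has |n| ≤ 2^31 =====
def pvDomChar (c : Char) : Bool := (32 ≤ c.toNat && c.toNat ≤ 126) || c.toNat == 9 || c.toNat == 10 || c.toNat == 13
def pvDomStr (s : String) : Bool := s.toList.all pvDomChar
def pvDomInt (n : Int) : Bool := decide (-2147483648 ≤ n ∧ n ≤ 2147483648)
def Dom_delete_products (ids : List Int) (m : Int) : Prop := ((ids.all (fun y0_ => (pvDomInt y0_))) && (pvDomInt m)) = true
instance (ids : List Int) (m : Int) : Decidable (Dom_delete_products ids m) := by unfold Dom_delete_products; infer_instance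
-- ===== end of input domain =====

-- B replaces A's comparison sort of (count, id) pairs by a bucket table over frequency values
-- scanned in increasing count order (a counting-sort style greedy); equivalence of the returned value is proved.

-- ===== PORT A =====
-- A: build an occurrence dict, turn it into [count, key] pairs, sort, then greedily delete groups.
def get_occurances (ids : List Int) : List (Int × Int) :=
  let occurances := ids.foldl (fun d elem =>
      if d.contains elem then d.insert elem (d.getD elem 0 + 1) else d.insert elem 1)
    PySem.Dict.empty
  let occurances_arr := occurances.keys.foldl
      (fun arr key => arr ++ [((occurances.getD key 0), key)]) []
  PySem.List.sorted2 occurances_arr Prod.fst Prod.snd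

-- A's 'for i in range(size)' loop with its two early/late 'return size - count' exits
def aLoop (occ : List (Int × Int)) (m count size : Int) : Int :=
  match occ with
  | [] => size - count
  | (c, _) :: t => if c ≤ m then aLoop t (m - c) (count + 1) size else size - count

def delete_products (ids : List Int) (m : Int) : Int :=
  let occurances := get_occurances ids
  let size : Int := occurances.length
  aLoop occurances m 0 size

-- ===== PORT B =====
-- Source B's inner 'while b > 0 and m >= c' loop; returns the updated (m, removed)
def bWhile (b m c removed : Int) : Int × Int :=
  if h : 0 < b ∧ c ≤ m then bWhile (b - 1) (m - c) c (removed + 1) else (m, removed)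
termination_by b.toNat
decreasing_by omega

def delete_products_alt (ids : List Int) (m : Int) : Int :=
  let freq := ids.foldl (fun d x => d.insert x (d.getD x 0 + 1)) PySem.Dict.empty
  if freq.size = 0 then 0
  else
    let maxC := (PySem.List.max? freq.values (fun v => v)).getD 0  -- max(freq.values()); nonempty here
    let buckets := freq.values.foldl (fun d c => d.insert c (d.getD c 0 + 1)) PySem.Dict.empty
    let st := (PySem.List.pyRange 1 (maxC + 1)).foldl
        (fun st c => bWhile (buckets.getD c 0) st.1 c st.2) (m, 0)
    (freq.size : Int) - st.2

-- ===== PRECONDITION & SPEC =====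
def Spec_delete_products (ids : List Int) (m : Int) (out : Int) : Prop := out = delete_products_alt ids m
instance (ids : List Int) (m : Int) (out : Int) : Decidable (Spec_delete_products ids m out) := by unfold Spec_delete_products; infer_instance

-- ===== CLAIM (what is proved, stated in full; the proofs are below) =====
def Claim_equal_delete_products : Prop := ∀ (ids : List Int) (m : Int), Dom_delete_products ids m → Spec_delete_products ids m (delete_products ids m)

-- ===== LEMMAS AND PROOFS =====

-- the strict lexicographic 'before' test sorted2 uses on (count, key) pairs
def pvLex (a b : Int × Int) : Bool :=
  decide (a.1 < b.1) || (!decide (b.1 < a.1) && decide (a.2 < b.2))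

-- one pass of the shared greedy: returns (left-over m, number of groups removed)
def pvScan : List Int → Int → Int × Int
  | [], m => (m, 0)
  | c :: t, m => if c ≤ m then ((pvScan t (m - c)).1, (pvScan t (m - c)).2 + 1) else pvScan t m

lemma pvLex_asymm {a b : Int × Int} (h : pvLex a b = true) : pvLex b a = false := by
  rcases a with ⟨a1, a2⟩; rcases b with ⟨b1, b2⟩
  simp [pvLex] at h ⊢; omega

lemma pvLex_trans_false {x y z : Int × Int} (h1 : pvLex x y = true) (h2 : pvLex z y = false) :
    pvLex z x = false := by
  rcases x with ⟨x1, x2⟩; rcases y with ⟨y1, y2⟩; rcases z with ⟨z1, z2⟩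
  simp [pvLex] at h1 h2 ⊢; omega

lemma insertBy_pvLex_pairwise (x : Int × Int) (ys : List (Int × Int))
    (h : ys.Pairwise (fun a b => pvLex b a = false)) :
    (PySem.List.insertBy pvLex x ys).Pairwise (fun a b => pvLex b a = false) := by
  induction ys with
  | nil => simp [PySem.List.insertBy]
  | cons y ys ih =>
    rw [List.pairwise_cons] at h
    rcases h with ⟨h1, h2⟩
    by_cases hb : pvLex x y = true
    · rw [show PySem.List.insertBy pvLex x (y :: ys) = x :: y :: ys by
        simp [PySem.List.insertBy, hb]]
      refine List.Pairwise.cons ?_ (List.Pairwise.cons h1 h2)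
      intro z hz
      rcases List.mem_cons.mp hz with rfl | hz
      · exact pvLex_asymm hb
      · exact pvLex_trans_false hb (h1 z hz)
    · rw [show PySem.List.insertBy pvLex x (y :: ys) = y :: PySem.List.insertBy pvLex x ys by
        simp [PySem.List.insertBy, hb]]
      refine List.Pairwise.cons ?_ (ih h2)
      intro z hz
      rcases (PySem.List.mem_insertBy pvLex x z ys).mp hz with rfl | hz
      · exact Bool.eq_false_iff.mpr hb
      · exact h1 z hz

lemma foldl_insertBy_pvLex_pairwise (xs acc : List (Int × Int))
    (h : acc.Pairwise (fun a b => pvLex b a = false)) :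
    (xs.foldl (fun acc x => PySem.List.insertBy pvLex x acc) acc).Pairwise
      (fun a b => pvLex b a = false) := by
  induction xs generalizing acc with
  | nil => exact h
  | cons x xs ih => exact ih _ (insertBy_pvLex_pairwise x acc h)

lemma sorted2_pairwise (xs : List (Int × Int)) :
    (PySem.List.sorted2 xs Prod.fst Prod.snd).Pairwise (fun a b => pvLex b a = false) := by
  show (xs.foldl (fun acc x => PySem.List.insertBy pvLex x acc) []).Pairwise _
  exact foldl_insertBy_pvLex_pairwise xs [] (List.Pairwise.nil)

lemma pvLex_false_fst_le {a b : Int × Int} (h : pvLex b a = false) : a.1 ≤ b.1 := by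
  rcases a with ⟨a1, a2⟩; rcases b with ⟨b1, b2⟩
  simp [pvLex] at h; omega

lemma pvScan_no (cs : List Int) (m : Int) (h : ∀ c ∈ cs, m < c) : pvScan cs m = (m, 0) := by
  induction cs with
  | nil => rfl
  | cons c t ih =>
    have hc := h c (by simp)
    simp only [pvScan]
    rw [if_neg (by omega)]
    exact ih (fun x hx => h x (by simp [hx]))

lemma pvScan_append (xs ys : List Int) (m : Int) :
    pvScan (xs ++ ys) m =
      ((pvScan ys (pvScan xs m).1).1, (pvScan xs m).2 + (pvScan ys (pvScan xs m).1).2) := by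
  induction xs generalizing m with
  | nil => simp [pvScan]
  | cons c t ih =>
    by_cases hc : c ≤ m
    · simp only [List.cons_append, pvScan, if_pos hc, ih, Prod.mk.injEq]
      exact ⟨trivial, by omega⟩
    · simp only [List.cons_append, pvScan, if_neg hc, ih]

lemma aLoop_eq (occ : List (Int × Int)) (m count size : Int)
    (h : (occ.map Prod.fst).Pairwise (· ≤ ·)) :
    aLoop occ m count size = size - (count + (pvScan (occ.map Prod.fst) m).2) := by
  induction occ generalizing m count with
  | nil => simp [aLoop, pvScan]
  | cons p t ih =>
    rcases p with ⟨c, k⟩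
    simp only [List.map_cons, List.pairwise_cons] at h
    rcases h with ⟨h1, h2⟩
    by_cases hc : c ≤ m
    · simp only [aLoop, if_pos hc, List.map_cons, pvScan, ih _ _ h2]; omega
    · have hno : pvScan (t.map Prod.fst) m = (m, 0) :=
        pvScan_no _ _ (fun x hx => lt_of_lt_of_le (by omega) (h1 x hx))
      simp only [aLoop, if_neg hc, List.map_cons, pvScan, hno]; omega

lemma bWhile_eq (b m c removed : Int) :
    bWhile b m c removed =
      ((pvScan (List.replicate b.toNat c) m).1,
        removed + (pvScan (List.replicate b.toNat c) m).2) := by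
  induction b, m, removed using bWhile.induct c with
  | case1 b m removed h ih =>
    rw [bWhile, dif_pos h]
    have hb : b.toNat = (b - 1).toNat + 1 := by omega
    rw [hb, List.replicate_succ]
    simp only [pvScan, if_pos h.2, ih, Prod.mk.injEq]
    exact ⟨trivial, by omega⟩
  | case2 b m removed h =>
    rw [bWhile, dif_neg h]
    by_cases hb : 0 < b
    · have hm : ¬ c ≤ m := fun hc => h ⟨hb, hc⟩
      rw [pvScan_no _ _ (fun x hx => by rw [List.eq_of_mem_replicate hx]; omega)]
      simp
    · have : b.toNat = 0 := by omega
      rw [this, List.replicate_zero]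
      simp [pvScan]

lemma foldl_bWhile_eq (cs : List Int) (g : Int → Int) (m r : Int) :
    cs.foldl (fun st c => bWhile (g c) st.1 c st.2) (m, r) =
      ((pvScan (cs.flatMap fun c => List.replicate (g c).toNat c) m).1,
        r + (pvScan (cs.flatMap fun c => List.replicate (g c).toNat c) m).2) := by
  induction cs generalizing m r with
  | nil => simp [pvScan]
  | cons c t ih =>
    rw [List.foldl_cons]
    show t.foldl _ (bWhile (g c) m c r) = _
    rw [bWhile_eq, ih]
    simp only [List.flatMap_cons, pvScan_append, Prod.mk.injEq]
    exact ⟨trivial, by omega⟩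

lemma count_flatMap_replicate (cs : List Int) (g : Int → Nat) (x : Int) (h : cs.Nodup) :
    (cs.flatMap fun c => List.replicate (g c) c).count x = if x ∈ cs then g x else 0 := by
  induction cs with
  | nil => simp
  | cons c t ih =>
    rw [List.nodup_cons] at h
    rw [List.flatMap_cons, List.count_append, ih h.2]
    by_cases hx : x = c
    · subst hx
      simp [h.1]
    · simp [List.count_replicate, Ne.symm hx, hx]

lemma pairwise_flatMap_replicate (cs : List Int) (g : Int → Nat)
    (h : cs.Pairwise (· < ·)) :
    (cs.flatMap fun c => List.replicate (g c) c).Pairwise (· ≤ ·) := by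
  induction cs with
  | nil => simp
  | cons c t ih =>
    rw [List.pairwise_cons] at h
    rw [List.flatMap_cons, List.pairwise_append]
    refine ⟨List.pairwise_replicate.mpr (Or.inr le_rfl), ih h.2, ?_⟩
    intro a ha b hb
    rw [List.eq_of_mem_replicate ha]
    rcases List.mem_flatMap.mp hb with ⟨c', hc', hb'⟩
    rw [List.eq_of_mem_replicate hb']
    exact le_of_lt (h.1 c' hc')

lemma pyRange_pairwise (a b : Int) : (PySem.List.pyRange a b).Pairwise (· < ·) := by
  have H : ∀ (n : Nat) (a : Int), (b - a).toNat = n → (PySem.List.pyRange a b).Pairwise (· < ·) := by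
    intro n
    induction n with
    | zero =>
      intro a hn
      have : PySem.List.pyRange a b = [] :=
        List.eq_nil_iff_forall_not_mem.mpr
          (fun x hx => by have := PySem.List.mem_pyRange_one.mp hx; omega)
      rw [this]
      exact List.Pairwise.nil
    | succ n ih =>
      intro a hn
      rw [PySem.List.pyRange_one_cons (by omega)]
      refine List.Pairwise.cons ?_ (ih (a + 1) (by omega))
      intro x hx
      have := PySem.List.mem_pyRange_one.mp hx
      omega
  exact H (b - a).toNat a rfl

lemma counter_fun_eq :
    (fun (d : PySem.Dict Int Int) elem =>
        if d.contains elem then d.insert elem (d.getD elem 0 + 1) else d.insert elem 1)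
      = (fun (d : PySem.Dict Int Int) x => d.insert x (d.getD x 0 + 1)) := by
  funext d x
  by_cases hx : d.contains x = true
  · rw [if_pos hx]
  · rw [if_neg (by simp [hx])]
    have h0 : d.getD x 0 = 0 := by
      unfold PySem.Dict.getD
      rw [(PySem.Dict.get?_eq_none_iff_contains d x).mpr (by simp [hx])]
      rfl
    rw [h0, zero_add]

lemma main_eq (ids : List Int) (m : Int) (hids : ids ≠ []) :
    delete_products ids m = delete_products_alt ids m := by
  set S := PySem.Set.ofList ids with hS
  set vals : List Int := S.map (fun k => ((ids.count k : Int))) with hvalsdef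
  have hSne : S ≠ [] := by
    rcases ids with _ | ⟨i, t⟩
    · exact absurd rfl hids
    · intro h0
      have hi : i ∈ S := (PySem.Set.mem_ofList _ _).mpr (by simp)
      rw [h0] at hi
      exact absurd hi (List.not_mem_nil)
  -- A's occurrence dict is Counter(ids); its pair list is S mapped to (count, key)
  have hpairs : get_occurances ids
      = PySem.List.sorted2 (S.map (fun k => ((ids.count k : Int), k))) Prod.fst Prod.snd := by
    unfold get_occurances
    simp only [counter_fun_eq, PySem.Dict.foldl_insert_getD_add_one_eq_counter,
      PySem.Dict.keys_counter, PySem.List.foldl_append_singleton_eq_map, List.nil_append,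
      PySem.Dict.getD_counter]
    rfl
  set L := PySem.List.sorted2 (S.map fun k => ((ids.count k : Int), k)) Prod.fst Prod.snd with hLdef
  have hPW : (L.map Prod.fst).Pairwise (· ≤ ·) :=
    List.pairwise_map.mpr ((sorted2_pairwise _).imp (fun h => pvLex_false_fst_le h))
  have hA : delete_products ids m
      = ((L.length : Nat) : Int) - (0 + (pvScan (L.map Prod.fst) m).2) := by
    show aLoop (get_occurances ids) m 0 ((get_occurances ids).length : Int) = _
    rw [hpairs]
    exact aLoop_eq _ _ _ _ hPW
  -- B side
  have hvals : (PySem.Dict.counter ids).values = vals := by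
    unfold PySem.Dict.values
    rw [PySem.Dict.items_counter, List.map_map]
    rfl
  have hsize : (PySem.Dict.counter ids).size = S.length := by
    unfold PySem.Dict.size
    rw [PySem.Dict.items_counter, List.length_map]
  have hvalsne : vals ≠ [] := by
    intro h0
    exact hSne (List.map_eq_nil_iff.mp (hvalsdef ▸ h0))
  obtain ⟨M, hM⟩ : ∃ M, PySem.List.max? vals (fun v => v) = some M := by
    cases hmx : PySem.List.max? vals (fun v => v) with
    | none => exact absurd ((PySem.List.max?_eq_none_iff _ _).mp hmx) hvalsne
    | some M => exact ⟨M, rfl⟩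
  have hg : ∀ c : Int, ((PySem.Dict.counter vals).getD c 0).toNat = vals.count c := by
    intro c
    rw [PySem.Dict.getD_counter, Int.toNat_natCast]
  have hB : delete_products_alt ids m
      = ((S.length : Nat) : Int) -
        (0 + (pvScan ((PySem.List.pyRange 1 (M + 1)).flatMap
            (fun c => List.replicate (vals.count c) c)) m).2) := by
    unfold delete_products_alt
    simp only [PySem.Dict.foldl_insert_getD_add_one_eq_counter, hvals, hsize]
    rw [if_neg (by simpa using hSne), hM]
    simp only [Option.getD_some]
    rw [foldl_bWhile_eq]
    have hfl :
        (fun c => List.replicate ((PySem.Dict.counter vals).getD c 0).toNat c)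
          = fun c => List.replicate (vals.count c) c :=
      funext (fun c => by rw [hg c])
    rw [hfl]
  -- the sorted count list and the bucket expansion are the same list
  have hperm1 : (L.map Prod.fst).Perm vals := by
    have hp := (PySem.List.sorted2_perm (S.map fun k => ((ids.count k : Int), k))
        Prod.fst Prod.snd false).map Prod.fst
    rw [List.map_map] at hp
    exact hp
  have hnodup : (PySem.List.pyRange 1 (M + 1)).Nodup :=
    (pyRange_pairwise 1 (M + 1)).imp (fun h => ne_of_lt h)
  have hvpos : ∀ v ∈ vals, 1 ≤ v := by
    intro v hv
    rcases List.mem_map.mp hv with ⟨k, hk, rfl⟩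
    have hkid : k ∈ ids := (PySem.Set.mem_ofList _ _).mp hk
    have := List.count_pos_iff.mpr hkid
    exact_mod_cast this
  have hvle : ∀ v ∈ vals, v ≤ M := fun v hv => PySem.List.max?_isMax hM v hv
  have hperm2 : ((PySem.List.pyRange 1 (M + 1)).flatMap
      (fun c => List.replicate (vals.count c) c)).Perm vals := by
    rw [List.perm_iff_count]
    intro x
    rw [count_flatMap_replicate _ _ _ hnodup]
    by_cases hx : x ∈ PySem.List.pyRange 1 (M + 1)
    · rw [if_pos hx]
    · rw [if_neg hx]
      symm
      rw [List.count_eq_zero]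
      intro hxv
      exact hx (PySem.List.mem_pyRange_one.mpr ⟨hvpos x hxv, by have := hvle x hxv; omega⟩)
  have hkey : L.map Prod.fst = (PySem.List.pyRange 1 (M + 1)).flatMap
      (fun c => List.replicate (vals.count c) c) :=
    List.Perm.eq_of_pairwise (fun a b _ _ h1 h2 => le_antisymm h1 h2) hPW
      (pairwise_flatMap_replicate _ _ (pyRange_pairwise 1 (M + 1)))
      (hperm1.trans hperm2.symm)
  have hlen : L.length = S.length := by
    rw [(PySem.List.sorted2_perm _ _ _ _).length_eq, List.length_map]
  rw [hA, hB, hkey, hlen]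

-- ===== VERDICT (by name: the statement is the Claim_ definition above) =====
theorem delete_products_spec : Claim_equal_delete_products := by
  intro ids m _
  unfold Spec_delete_products
  by_cases hids : ids = []
  · subst hids
    simp [delete_products, delete_products_alt, get_occurances, aLoop,
      PySem.List.sorted2, PySem.Dict.empty, PySem.Dict.size, PySem.Dict.keys]
  · exact main_eq ids m hids
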